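-- pv_equiv track=rewrite | github.com/Alvaropz/Python_problems_BinarySearch | 2. Medium/k_compare/k_compare.py | k_compare
-- ===== SOURCE A (Python) =====
-- def k_compare(a, b, k):
--     if k == 0:
--         return len(a)
--     greatest_n = sorted(b)[-k]
--     total = 0
--     for number in a:
--         if number < greatest_n:
--             total += 1
--     return total
-- ===== SOURCE B (Python) =====
-- def _quickselect(xs, p):
--     # p-th smallest (0-indexed) of xs, by iterative three-way partitioning (middle pivot)
--     while True:
--         pivot = xs[len(xs) // 2]
--         lt = [x for x in xs if x < pivot]
--         if p < len(lt):
--             xs = lt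
--             continue
--         eq = sum(1 for x in xs if x == pivot)
--         if p < len(lt) + eq:
--             return pivot
--         p = p - len(lt) - eq
--         xs = [x for x in xs if x > pivot]
--
--
-- def k_compare(a, b, k):
--     if k == 0:
--         return len(a)
--     t = _quickselect(b, len(b) - k)
--     return sum(1 for x in a if x < t)
-- ===== Notes on version B (the rewrite author's own statement) =====
-- stated objective: alternative
-- what changed: B replaces A's full sort of b with an iterative three-way quickselect that finds the k-th largest directly, then counts a's smaller elements in one pass; Pre_ excludes k outside [0, len(b)], where A either raises IndexError or (for small negative k) returns a count against an accidental negative-index wraparound of sorted(b)[-k], while B's quickselect raises.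
-- outside the precondition, e.g. on k_compare([1, 2, 3], [5, 1, 4], -1): A returns 3, B raises IndexError
import Mathlib
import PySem

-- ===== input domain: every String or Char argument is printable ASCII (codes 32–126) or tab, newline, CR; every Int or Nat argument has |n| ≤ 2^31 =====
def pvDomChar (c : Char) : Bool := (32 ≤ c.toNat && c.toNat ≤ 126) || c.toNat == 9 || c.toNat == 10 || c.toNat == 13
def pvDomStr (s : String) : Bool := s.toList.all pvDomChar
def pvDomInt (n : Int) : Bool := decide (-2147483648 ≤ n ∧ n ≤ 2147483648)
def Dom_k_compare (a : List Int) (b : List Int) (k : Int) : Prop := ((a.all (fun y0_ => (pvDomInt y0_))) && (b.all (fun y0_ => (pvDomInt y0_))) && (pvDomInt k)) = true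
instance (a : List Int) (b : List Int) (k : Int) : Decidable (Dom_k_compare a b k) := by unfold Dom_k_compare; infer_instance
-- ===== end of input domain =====

-- B finds the k-th largest of b by three-way quickselect instead of sorting b, then counts a's smaller elements in one pass.


-- ===== PORT A =====
-- sorted(b)[-k]: none = IndexError (excluded by Pre_); the 0 of the none branch is never reached under Pre_
def k_compare (a : List Int) (b : List Int) (k : Int) : Int :=
  if k = 0 then (a.length : Int)
  else
    match PySem.List.pyGet? (PySem.List.sorted b (fun x => x) false) (-k) with
    | none => 0
    | some greatest_n => a.foldl (fun total number => if number < greatest_n then total + 1 else total) 0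

-- ===== PORT B =====
-- p-th smallest (0-indexed) of xs by iterative three-way partitioning (middle pivot);
-- xs = [] is Python's IndexError (excluded by Pre_); Source B's while-loop is this tail recursion
def pvQuickselect (xs : List Int) (p : Int) : Int :=
  match xs with
  | [] => 0
  | x :: rest =>
    let pivot := (x :: rest)[(x :: rest).length / 2]'(Nat.div_lt_self (Nat.succ_pos _) Nat.one_lt_two)
    let lt := (x :: rest).filter (fun y => y < pivot)
    if p < (lt.length : Int) then pvQuickselect lt p
    else
      let eq := (x :: rest).countP (fun y => y == pivot)
      if p < (lt.length : Int) + (eq : Int) then pivot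
      else pvQuickselect ((x :: rest).filter (fun y => pivot < y)) (p - lt.length - eq)
  termination_by xs.length
  decreasing_by
  · exact List.length_filter_lt_length_iff_exists.2 ⟨pivot, List.getElem_mem _, by simp; exact le_refl _⟩
  · exact List.length_filter_lt_length_iff_exists.2 ⟨pivot, List.getElem_mem _, by simp; exact le_refl _⟩

def k_compare_alt (a : List Int) (b : List Int) (k : Int) : Int :=
  if k = 0 then (a.length : Int)
  else
    let t := pvQuickselect b ((b.length : Int) - k)
    ((a.countP (fun x => x < t) : Nat) : Int)

-- ===== PRECONDITION & SPEC =====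
-- Pre_ excludes k outside [0, len(b)]: for k > len(b) or k ≤ -len(b) A raises IndexError, and for
-- -len(b) < k < 0 A returns a count against sorted(b)[-k] read from the FRONT of the sorted list — an
-- accidental negative-index wraparound — while B's quickselect raises IndexError on all of these inputs.
def Pre_k_compare (a : List Int) (b : List Int) (k : Int) : Prop :=
  k = 0 ∨ (0 < k ∧ k ≤ (b.length : Int))
instance (a : List Int) (b : List Int) (k : Int) : Decidable (Pre_k_compare a b k) := by
  unfold Pre_k_compare; infer_instance
def pvWitness_k_compare : List Int × List Int × Int := ([1, 5, 3], [2, 4, 2], 2)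

def Spec_k_compare (a : List Int) (b : List Int) (k : Int) (out : Int) : Prop := out = k_compare_alt a b k
instance (a : List Int) (b : List Int) (k : Int) (out : Int) : Decidable (Spec_k_compare a b k out) := by unfold Spec_k_compare; infer_instance

-- ===== CLAIM (what is proved, stated in full; the proofs are below) =====
def Claim_equal_k_compare : Prop := ∀ (a : List Int) (b : List Int) (k : Int), Dom_k_compare a b k → Pre_k_compare a b k → Spec_k_compare a b k (k_compare a b k)

-- ===== LEMMAS AND PROOFS =====

-- the three filters around a pivot are a permutation of the list
lemma pvPartition_perm (xs : List Int) (pivot : Int) :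
    (xs.filter (fun x => x < pivot) ++ xs.filter (fun x => x == pivot)
      ++ xs.filter (fun x => pivot < x)).Perm xs := by
  have h1 := List.filter_append_perm (fun x => decide (x < pivot)) xs
  have h2 := List.filter_append_perm (fun x => x == pivot)
      (xs.filter (fun x => !decide (x < pivot)))
  have e1 : (xs.filter (fun x => !decide (x < pivot))).filter (fun x => x == pivot)
      = xs.filter (fun x => x == pivot) := by
    rw [List.filter_filter]
    apply List.filter_congr
    intro x _
    by_cases h : x = pivot <;> simp [h]
  have e2 : (xs.filter (fun x => !decide (x < pivot))).filter (fun x => !(x == pivot))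
      = xs.filter (fun x => pivot < x) := by
    rw [List.filter_filter]
    apply List.filter_congr
    intro x _
    by_cases h : x = pivot
    · simp [h]
    · by_cases hlt : x < pivot
      · simp [hlt]
        omega
      · have hgt : pivot < x := by omega
        simp [h, hlt, hgt]
  have step : (xs.filter (fun x => x < pivot) ++ xs.filter (fun x => x == pivot)
      ++ xs.filter (fun x => pivot < x))
      = xs.filter (fun x => x < pivot) ++ ((xs.filter (fun x => !decide (x < pivot))).filter (fun x => x == pivot)
        ++ (xs.filter (fun x => !decide (x < pivot))).filter (fun x => !(x == pivot))) := by
    rw [e1, e2, List.append_assoc]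
  rw [step]
  exact (List.Perm.append_left _ h2).trans h1

-- the three-way partition of xs around pivot, each part sorted, IS sorted xs
lemma pvSorted_partition (xs : List Int) (pivot : Int) :
    PySem.List.sorted xs (fun x => x) false =
      PySem.List.sorted (xs.filter (fun x => x < pivot)) (fun x => x) false
        ++ xs.filter (fun x => x == pivot)
        ++ PySem.List.sorted (xs.filter (fun x => pivot < x)) (fun x => x) false := by
  apply PySem.List.sorted_id_eq_of_perm_of_pairwise
  · exact (List.Perm.append (List.Perm.append (PySem.List.sorted_perm _ _ _) (List.Perm.refl _))
      (PySem.List.sorted_perm _ _ _)).trans (pvPartition_perm xs pivot)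
  · have hlt : ∀ y ∈ PySem.List.sorted (xs.filter (fun x => x < pivot)) (fun x => x) false, y < pivot := by
      intro y hy
      have := (PySem.List.mem_sorted _ _ _ _).1 hy
      simpa using (List.of_mem_filter this)
    have heq : ∀ y ∈ xs.filter (fun x => x == pivot), y = pivot := by
      intro y hy; simpa using (List.of_mem_filter hy)
    have hgt : ∀ y ∈ PySem.List.sorted (xs.filter (fun x => pivot < x)) (fun x => x) false, pivot < y := by
      intro y hy
      have := (PySem.List.mem_sorted _ _ _ _).1 hy
      simpa using (List.of_mem_filter this)
    rw [List.append_assoc]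
    apply List.pairwise_append.2
    refine ⟨by simpa using PySem.List.sorted_pairwise _ _, ?_, ?_⟩
    · apply List.pairwise_append.2
      refine ⟨?_, by simpa using PySem.List.sorted_pairwise _ _, ?_⟩
      · exact List.pairwise_of_forall_mem_list (fun a ha b hb => by
          have := heq a ha; have := heq b hb; omega)
      · intro a ha b hb; have := heq a ha; have := hgt b hb; omega
    · intro a ha b hb
      have h1 := hlt a ha
      rcases List.mem_append.1 hb with hb | hb
      · have := heq b hb; omega
      · have := hgt b hb; omega

-- quickselect computes the p-th element of the sorted list (for p a valid nonnegative index)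
lemma pvQuickselect_eq_sorted_get (xs : List Int) (p : Int) (h0 : 0 ≤ p) (hp : p < (xs.length : Int)) :
    (PySem.List.sorted xs (fun x => x) false)[p.toNat]?.getD 0 = pvQuickselect xs p := by
  fun_induction pvQuickselect xs p with
  | case1 p => simp at hp; omega
  | case2 p x rest pivot lt hlt ih =>
    have hlen : (PySem.List.sorted ((x :: rest).filter (fun y => y < pivot)) (fun x => x) false).length = lt.length := PySem.List.length_sorted _ _ _
    rw [pvSorted_partition (x :: rest) pivot, List.append_assoc,
        List.getElem?_append_left (by omega)]
    exact ih h0 (by exact_mod_cast hlt)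
  | case3 p x rest pivot lt hnlt eq heq =>
    have hlen : (PySem.List.sorted ((x :: rest).filter (fun y => y < pivot)) (fun x => x) false).length = lt.length := PySem.List.length_sorted _ _ _
    have heqlen : ((x :: rest).filter (fun y => y == pivot)).length = eq :=
      List.countP_eq_length_filter.symm
    rw [pvSorted_partition (x :: rest) pivot, List.append_assoc,
        List.getElem?_append_right (by omega), List.getElem?_append_left (by omega)]
    have hidx : p.toNat - (PySem.List.sorted ((x :: rest).filter (fun y => y < pivot)) (fun x => x) false).length
        < ((x :: rest).filter (fun y => y == pivot)).length := by omega
    rw [List.getElem?_eq_getElem hidx]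
    have := List.of_mem_filter (List.getElem_mem hidx)
    simpa using this
  | case4 p x rest pivot lt hnlt eq hneq ih =>
    have hlen : (PySem.List.sorted ((x :: rest).filter (fun y => y < pivot)) (fun x => x) false).length = lt.length := PySem.List.length_sorted _ _ _
    have heqlen : ((x :: rest).filter (fun y => y == pivot)).length = eq :=
      List.countP_eq_length_filter.symm
    have htotal := (pvPartition_perm (x :: rest) pivot).length_eq
    simp only [List.length_append] at htotal
    have hc : lt.length = ((x :: rest).filter (fun y => y < pivot)).length := rfl
    have hgt : p - lt.length - eq < (((x :: rest).filter (fun y => pivot < y)).length : Int) := by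
      omega
    rw [pvSorted_partition (x :: rest) pivot, List.append_assoc,
        List.getElem?_append_right (by omega), List.getElem?_append_right (by omega)]
    have harith : p.toNat - (PySem.List.sorted ((x :: rest).filter (fun y => y < pivot)) (fun x => x) false).length
        - ((x :: rest).filter (fun y => y == pivot)).length = (p - lt.length - eq).toNat := by omega
    rw [harith]
    exact ih (by omega) hgt

-- ===== VERDICT (by name: the statement is the Claim_ definition above) =====
theorem k_compare_spec : Claim_equal_k_compare := by
  intro a b k _ hpre
  unfold Spec_k_compare
  by_cases hk : k = 0
  · simp [k_compare, k_compare_alt, hk]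
  · rcases hpre with h0 | ⟨h1, h2⟩
    · exact absurd h0 hk
    have hsl : (PySem.List.sorted b (fun x => x) false).length = b.length :=
      PySem.List.length_sorted _ _ _
    have hget : PySem.List.pyGet? (PySem.List.sorted b (fun x => x) false) (-k)
        = (PySem.List.sorted b (fun x => x) false)[((b.length : Int) - k).toNat]? := by
      have hkn : k = (k.toNat : Int) := by omega
      have := PySem.List.pyGet?_neg_natCast (PySem.List.sorted b (fun x => x) false) k.toNat
        (by omega) (by omega)
      rw [hkn, this]
      congr 1
      omega
    have hp0 : (0 : Int) ≤ (b.length : Int) - k := by omega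
    have hpl : (b.length : Int) - k < (b.length : Int) := by omega
    have hsel := pvQuickselect_eq_sorted_get b ((b.length : Int) - k) hp0 hpl
    obtain ⟨g, hg⟩ : ∃ g, PySem.List.pyGet? (PySem.List.sorted b (fun x => x) false) (-k) = some g :=
      ⟨_, by rw [hget, List.getElem?_eq_getElem (by omega)]⟩
    have hq : pvQuickselect b ((b.length : Int) - k) = g := by
      rw [hget, List.getElem?_eq_getElem (by omega)] at hg
      rw [List.getElem?_eq_getElem (by omega), Option.getD_some] at hsel
      rw [← hsel]
      exact (Option.some.injEq _ _ ▸ hg)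
    simp only [k_compare, k_compare_alt, if_neg hk]
    rw [hg]
    show _ = ((a.countP (fun x => x < pvQuickselect b ((b.length : Int) - k)) : Nat) : Int)
    rw [hq]
    have hc := PySem.List.foldl_count_if (fun x => decide (x < g)) a 0
    simp only [decide_eq_true_eq] at hc
    simpa using hc
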